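-- pv_equiv track=rewrite | github.com/zerg0s/LetsLearnGit | alphabet_dimanchella.py | get_iterating_strs
-- ===== SOURCE A (Python) =====
-- A_CODE = 97
--
-- Z_CODE = 122
--
-- def incr_list_ord(string_codes: list[int], index):
--     if string_codes[index] + 1 > Z_CODE:
--         string_codes[index] = A_CODE
--         return incr_list_ord(string_codes, index - 1)
--     else:
--         string_codes[index] += 1
--         return string_codes
--
-- def increment_list_ord(string_codes: list[int]):
--     return incr_list_ord(string_codes.copy(), len(string_codes) - 1)
--
-- def get_str_chr(string_codes: list[int]):
--     return ''.join(map(chr, string_codes))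
--
-- def get_list_ord(string: str):
--     return list(map(ord, string))
--
-- def is_correct_str(string: str):
--     return string.isalpha() and string.islower()
--
-- def get_iterating_strs(string1: str, string2: str):
--     if len(string1) != len(string2) or string1 > string2 \
--             or not is_correct_str(string1) or not is_correct_str(string2):
--         raise ValueError
--     iter_strs = [string1]
--     str_codes = get_list_ord(string1)
--     while get_str_chr(str_codes) != string2:
--         str_codes = increment_list_ord(str_codes)
--         iter_strs.append(get_str_chr(str_codes))
--     return iter_strs
-- ===== SOURCE B (Python) =====
-- def get_iterating_strs(string1: str, string2: str):
--     if len(string1) != len(string2) or string1 > string2 \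
--             or not (string1.isalpha() and string1.islower()) \
--             or not (string2.isalpha() and string2.islower()):
--         raise ValueError
--     L = len(string1)
--
--     def to_num(s):
--         n = 0
--         for ch in s:
--             n = n * 26 + (ord(ch) - 97)
--         return n
--
--     def to_str(n):
--         chars = []
--         for _ in range(L):
--             n, d = divmod(n, 26)
--             chars.append(chr(97 + d))
--         return ''.join(reversed(chars))
--
--     return [to_str(n) for n in range(to_num(string1), to_num(string2) + 1)]
-- ===== Notes on version B (the rewrite author's own statement) =====
-- stated objective: alternative
-- what changed: Replaces the symbolic successor loop (repeated in-place carry propagation over an ord-code list, re-stringifying and comparing to string2 each iteration) by an arithmetic enumeration: both endpoints are read as base-26 integers and each string in the range is reconstructed independently by repeated divmod.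
import Mathlib
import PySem

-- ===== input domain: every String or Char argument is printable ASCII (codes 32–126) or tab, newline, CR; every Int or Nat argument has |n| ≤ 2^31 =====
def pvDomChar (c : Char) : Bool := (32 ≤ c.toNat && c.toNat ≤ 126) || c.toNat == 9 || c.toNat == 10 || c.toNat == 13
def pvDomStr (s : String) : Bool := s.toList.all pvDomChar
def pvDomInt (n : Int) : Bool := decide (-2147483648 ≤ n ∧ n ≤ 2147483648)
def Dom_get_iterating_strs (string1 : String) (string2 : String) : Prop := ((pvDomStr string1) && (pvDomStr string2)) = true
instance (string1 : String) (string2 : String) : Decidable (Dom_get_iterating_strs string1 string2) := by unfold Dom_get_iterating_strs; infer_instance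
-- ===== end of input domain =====

-- B replaces A's symbolic successor loop (in-place carry propagation over an ord-code list, comparing
-- the re-built string with string2 each iteration) by an arithmetic enumeration: endpoints read as
-- base-26 integers, each output string rebuilt independently by repeated divmod (objective: alternative).

-- ===== PORT A =====

-- str.islower() restricted to the ASCII domain, where the cased characters are exactly the letters:
-- at least one cased character and no uppercase one.
def str_islower (s : String) : Bool :=
  s.toList.any PySem.Chars.isalpha && !(s.toList.any PySem.Chars.isupper)

-- incr_list_ord, with a fuel guard making the recursion total (Python recurses on index-1 and raises
-- IndexError once the negative index leaves the list; none = that exception, never reached under Pre_).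
def incr_list_ord (fuel : Nat) (string_codes : List Int) (index : Int) : Option (List Int) :=
  match fuel with
  | 0 => none
  | f + 1 =>
    match PySem.List.pyGet? string_codes index with
    | none => none
    | some v =>
      if v + 1 > 122 then
        incr_list_ord f (PySem.List.pySetD string_codes index 97) (index - 1)
      else
        some (PySem.List.pySetD string_codes index (v + 1))

def increment_list_ord (string_codes : List Int) : Option (List Int) :=
  incr_list_ord (string_codes.length + 2) string_codes ((string_codes.length : Int) - 1)

def get_str_chr (string_codes : List Int) : String :=
  String.ofList (string_codes.map (fun n => Char.ofNat n.toNat))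

def get_list_ord (s : String) : List Int :=
  s.toList.map (fun c => (c.toNat : Int))

def is_correct_str (s : String) : Bool :=
  PySem.Str.strIsalpha s && str_islower s

-- the while loop; fuel bounds the number of iterations (never exhausted under Pre_)
def iter_loop (fuel : Nat) (string2 : String) (str_codes : List Int) (iter_strs : List String) : List String :=
  match fuel with
  | 0 => iter_strs
  | f + 1 =>
    if get_str_chr str_codes = string2 then iter_strs
    else
      match increment_list_ord str_codes with
      | none => iter_strs
      | some codes' => iter_loop f string2 codes' (iter_strs ++ [get_str_chr codes'])

def get_iterating_strs (string1 : String) (string2 : String) : List String :=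
  if PySem.Str.len string1 ≠ PySem.Str.len string2 ∨ string2 < string1
      ∨ ¬ is_correct_str string1 ∨ ¬ is_correct_str string2 then
    []  -- Python raises ValueError here; excluded by Pre_
  else
    iter_loop (26 ^ string2.toList.length + 1) string2 (get_list_ord string1) [string1]

-- ===== PORT B =====

def b_to_num (s : String) : Int :=
  s.toList.foldl (fun n ch => n * 26 + ((ch.toNat : Int) - 97)) 0

-- the 'for _ in range(L)' divmod loop of B's to_str, appending chr(97+d) each round
def b_to_str_loop : Nat → Int → List Char → Int × List Char
  | 0, n, chars => (n, chars)
  | l + 1, n, chars =>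
      b_to_str_loop l (PySem.Int.floordiv n 26)
        (chars ++ [Char.ofNat (97 + PySem.Int.mod n 26).toNat])

def b_to_str (L : Nat) (n : Int) : String :=
  String.ofList (b_to_str_loop L n []).2.reverse

def get_iterating_strs_alt (string1 : String) (string2 : String) : List String :=
  if PySem.Str.len string1 ≠ PySem.Str.len string2 ∨ string2 < string1
      ∨ ¬ (PySem.Str.strIsalpha string1 && str_islower string1)
      ∨ ¬ (PySem.Str.strIsalpha string2 && str_islower string2) then
    []  -- Python raises ValueError here; excluded by Pre_
  else
    (PySem.List.pyRange (b_to_num string1) (b_to_num string2 + 1)).map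
      (b_to_str string1.toList.length)

-- ===== PRECONDITION & SPEC =====

-- Pre_ excludes exactly the inputs on which A raises ValueError (length mismatch, string1 > string2,
-- or a string that is not a nonempty all-lowercase-letter string).
def Pre_get_iterating_strs (string1 : String) (string2 : String) : Prop :=
  string1.toList.length = string2.toList.length ∧ ¬ string2.toList < string1.toList ∧
  string1.toList ≠ [] ∧
  string1.toList.all PySem.Chars.islower = true ∧
  string2.toList.all PySem.Chars.islower = true

instance (string1 : String) (string2 : String) : Decidable (Pre_get_iterating_strs string1 string2) := by
  unfold Pre_get_iterating_strs; infer_instance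

def pvWitness_get_iterating_strs : String × String := ("ay", "bc")

def Spec_get_iterating_strs (string1 : String) (string2 : String) (out : List String) : Prop := out = get_iterating_strs_alt string1 string2
instance (string1 : String) (string2 : String) (out : List String) : Decidable (Spec_get_iterating_strs string1 string2 out) := by unfold Spec_get_iterating_strs; infer_instance

-- ===== CLAIM (what is proved, stated in full; the proofs are below) =====
def Claim_equal_get_iterating_strs : Prop := ∀ (string1 : String) (string2 : String), Dom_get_iterating_strs string1 string2 → Pre_get_iterating_strs string1 string2 → Spec_get_iterating_strs string1 string2 (get_iterating_strs string1 string2)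

-- ===== LEMMAS AND PROOFS =====

-- the base-26 value of a list of ord codes (a=97 … z=122), as A's loop state carries them
def valC (codes : List Int) : Int :=
  codes.foldl (fun n c => n * 26 + (c - 97)) 0

-- all codes are lowercase-letter codes
def GoodC (codes : List Int) : Prop := ∀ c ∈ codes, 97 ≤ c ∧ c ≤ 122

-- the digit-characters B's divmod loop emits (least significant first)
def digs : Nat → Int → List Char
  | 0, _ => []
  | l + 1, n => Char.ofNat (97 + PySem.Int.mod n 26).toNat :: digs l (PySem.Int.floordiv n 26)

lemma valC_from (codes : List Int) (a : Int) :
    codes.foldl (fun n c => n * 26 + (c - 97)) a = a * 26 ^ codes.length + valC codes := by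
  induction codes generalizing a with
  | nil => simp [valC]
  | cons c cs ih =>
    simp only [valC, List.foldl_cons, List.length_cons]
    rw [ih (a * 26 + (c - 97)), ih (0 * 26 + (c - 97))]
    ring

lemma valC_append (xs ys : List Int) :
    valC (xs ++ ys) = valC xs * 26 ^ ys.length + valC ys := by
  have h := valC_from ys (valC xs)
  simpa [valC, List.foldl_append] using h

lemma valC_cons (c : Int) (cs : List Int) :
    valC (c :: cs) = (c - 97) * 26 ^ cs.length + valC cs := by
  have h := valC_from cs (0 * 26 + (c - 97))
  simpa [valC, List.foldl_cons] using h

lemma valC_nonneg_aux : ∀ (codes : List Int), GoodC codes →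
    ∀ a : Int, 0 ≤ a → 0 ≤ codes.foldl (fun n c => n * 26 + (c - 97)) a
  | [], _, a, ha => by simp [ha]
  | c :: cs, h, a, ha => by
    simp only [List.foldl_cons]
    apply valC_nonneg_aux cs (fun x hx => h x (List.mem_cons_of_mem _ hx))
    have := h c List.mem_cons_self
    omega

lemma valC_nonneg (codes : List Int) (h : GoodC codes) : 0 ≤ valC codes :=
  valC_nonneg_aux codes h 0 le_rfl

lemma valC_lt_aux : ∀ (codes : List Int), GoodC codes →
    ∀ a : Int, codes.foldl (fun n c => n * 26 + (c - 97)) a < (a + 1) * 26 ^ codes.length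
  | [], _, a => by simp
  | c :: cs, h, a => by
    simp only [List.foldl_cons, List.length_cons]
    have h1 := valC_lt_aux cs (fun x hx => h x (List.mem_cons_of_mem _ hx)) (a * 26 + (c - 97))
    have hc := h c List.mem_cons_self
    have h2 : (a * 26 + (c - 97) + 1) * 26 ^ cs.length ≤ (a + 1) * 26 ^ (cs.length + 1) := by
      rw [pow_succ]
      have : a * 26 + (c - 97) + 1 ≤ (a + 1) * 26 := by omega
      calc (a * 26 + (c - 97) + 1) * 26 ^ cs.length ≤ ((a + 1) * 26) * 26 ^ cs.length :=
            mul_le_mul_of_nonneg_right this (by positivity)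
        _ = (a + 1) * (26 ^ cs.length * 26) := by ring
    omega

lemma valC_lt (codes : List Int) (h : GoodC codes) : valC codes < 26 ^ codes.length := by
  have := valC_lt_aux codes h 0
  simpa [valC] using this

lemma valC_replicate_z (k : Nat) : valC (List.replicate k 122) = 26 ^ k - 1 := by
  induction k with
  | zero => simp [valC]
  | succ k ih =>
    rw [List.replicate_succ, valC_cons, List.length_replicate, ih, pow_succ]
    ring

lemma valC_replicate_a (k : Nat) : valC (List.replicate k 97) = 0 := by
  induction k with
  | zero => simp [valC]
  | succ k ih =>
    rw [List.replicate_succ, valC_cons, List.length_replicate, ih]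
    ring

lemma b_to_str_loop_snd (l : Nat) : ∀ (n : Int) (chars : List Char),
    (b_to_str_loop l n chars).2 = chars ++ digs l n := by
  induction l with
  | zero => intro n chars; simp [b_to_str_loop, digs]
  | succ l ih =>
    intro n chars
    rw [b_to_str_loop, digs, ih]
    simp

lemma ord_chr (n : Int) (h1 : 97 ≤ n) (h2 : n ≤ 122) :
    ((Char.ofNat n.toNat).toNat : Int) = n := by
  interval_cases n <;> rfl

lemma chr_ord (c : Char) :
    Char.ofNat ((c.toNat : Int)).toNat = c := by
  rw [Int.toNat_natCast, Char.ofNat_toNat]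

lemma char_le_toNat {a b : Char} (h : a ≤ b) : a.toNat ≤ b.toNat :=
  Fin.mk_le_mk.mp h

lemma char_lt_toNat {a b : Char} (h : a < b) : a.toNat < b.toNat :=
  Nat.lt_of_succ_le h

lemma good_map (l : List Char) (h : ∀ c ∈ l, 'a' ≤ c ∧ c ≤ 'z') :
    GoodC (l.map (fun c => (c.toNat : Int))) := by
  intro x hx
  simp only [List.mem_map] at hx
  obtain ⟨c, hc, rfl⟩ := hx
  have h1 := char_le_toNat (h c hc).1
  have h2 := char_le_toNat (h c hc).2
  have e1 : ('a').toNat = 97 := rfl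
  have e2 : ('z').toNat = 122 := rfl
  omega

lemma digs_val (codes : List Int) (h : GoodC codes) :
    digs codes.length (valC codes) = (codes.map (fun n => Char.ofNat n.toNat)).reverse := by
  induction codes using List.reverseRecOn with
  | nil => simp [digs, valC]
  | append_singleton xs c ih =>
    have hgx : GoodC xs := fun x hx => h x (by simp [hx])
    have hc : 97 ≤ c ∧ c ≤ 122 := h c (by simp)
    have hxn := valC_nonneg xs hgx
    have hv : valC (xs ++ [c]) = valC xs * 26 + (c - 97) := by
      have := valC_append xs [c]
      have hvc : valC [c] = c - 97 := by
        have := valC_cons c []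
        simpa [valC] using this
      simp only [List.length_cons, List.length_nil] at this
      omega
    have hmod : PySem.Int.mod (valC (xs ++ [c])) 26 = c - 97 := by
      rw [PySem.Int.mod_eq_emod_of_pos (by norm_num), hv]
      omega
    have hdiv : PySem.Int.floordiv (valC (xs ++ [c])) 26 = valC xs := by
      rw [PySem.Int.floordiv_eq_ediv_of_pos (by norm_num), hv]
      omega
    have hlen : (xs ++ [c]).length = xs.length + 1 := by simp
    rw [hlen, digs, hmod, hdiv, ih hgx]
    have h97 : (97 : Int) + (c - 97) = c := by ring
    rw [h97]
    simp

lemma b_to_str_val (codes : List Int) (h : GoodC codes) :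
    b_to_str codes.length (valC codes) = get_str_chr codes := by
  unfold b_to_str get_str_chr
  rw [b_to_str_loop_snd, List.nil_append, digs_val codes h, List.reverse_reverse]

lemma set_len {α : Type} (front : List α) (d : α) (t : List α) (v : α) :
    (front ++ d :: t).set front.length v = front ++ v :: t := by
  induction front with
  | nil => simp
  | cons a l ih => simp [ih]

lemma incr_spec (k : Nat) : ∀ (m : Nat) (front : List Int) (d : Int) (f : Nat),
    97 ≤ d → d < 122 → k + 1 ≤ f →
    incr_list_ord f (front ++ d :: (List.replicate k 122 ++ List.replicate m 97))
        ((front.length + k : Nat) : Int)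
      = some (front ++ (d + 1) :: List.replicate (k + m) 97) := by
  induction k with
  | zero =>
    intro m front d f hd1 hd2 hf
    obtain ⟨f', rfl⟩ : ∃ f', f = f' + 1 := ⟨f - 1, by omega⟩
    have hidx : ((front.length + 0 : Nat) : Int) = (front.length : Int) := by simp
    rw [incr_list_ord, hidx]
    simp only [List.replicate_zero, List.nil_append]
    rw [PySem.List.pyGet?_append_length]
    simp only
    rw [if_neg (by omega)]
    rw [PySem.List.pySetD_natCast, set_len]
    simp
  | succ k ih =>
    intro m front d f hd1 hd2 hf
    obtain ⟨f', rfl⟩ : ∃ f', f = f' + 1 := ⟨f - 1, by omega⟩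
    have hsh : front ++ d :: (List.replicate (k + 1) 122 ++ List.replicate m 97)
        = (front ++ d :: List.replicate k 122) ++ 122 :: List.replicate m 97 := by
      rw [List.replicate_succ' (n := k)]
      simp
    have hplen : (front ++ d :: List.replicate k 122).length = front.length + (k + 1) := by
      simp
    have hidx : ((front.length + (k + 1) : Nat) : Int)
        = (((front ++ d :: List.replicate k 122).length : Nat) : Int) := by
      rw [hplen]
    rw [incr_list_ord, hsh, hidx, PySem.List.pyGet?_append_length]
    simp only
    rw [if_pos (by omega)]
    rw [PySem.List.pySetD_natCast, set_len]
    have hre : (front ++ d :: List.replicate k 122) ++ 97 :: List.replicate m 97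
        = front ++ d :: (List.replicate k 122 ++ List.replicate (m + 1) 97) := by
      simp [List.replicate_succ]
    have hidx2 : (((front ++ d :: List.replicate k 122).length : Nat) : Int) - 1
        = ((front.length + k : Nat) : Int) := by
      rw [hplen]; push_cast; ring
    rw [hre, hidx2, ih (m + 1) front d f' hd1 hd2 (by omega)]
    have : k + (m + 1) = k + 1 + m := by omega
    rw [this]

lemma exists_split (codes : List Int) (h : GoodC codes)
    (hlt : valC codes < 26 ^ codes.length - 1) :
    ∃ front d k, codes = front ++ d :: List.replicate k 122 ∧ GoodC front ∧ 97 ≤ d ∧ d < 122 := by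
  induction codes using List.reverseRecOn with
  | nil => simp [valC] at hlt
  | append_singleton xs c ih =>
    have hc : 97 ≤ c ∧ c ≤ 122 := h c (by simp)
    have hgx : GoodC xs := fun x hx => h x (by simp [hx])
    by_cases hcz : c < 122
    · exact ⟨xs, c, 0, by simp, hgx, hc.1, hcz⟩
    · have hceq : c = 122 := by omega
      subst hceq
      have hv : valC (xs ++ [122]) = valC xs * 26 + 25 := by
        have h1 := valC_append xs [122]
        have h2 : valC [122] = 25 := by simp [valC]
        simp only [List.length_cons, List.length_nil] at h1
        omega
      have hx : valC xs < 26 ^ xs.length - 1 := by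
        have hlen : (xs ++ [122]).length = xs.length + 1 := by simp
        rw [hlen, hv, pow_succ] at hlt
        have hpos : (0:Int) < 26 ^ xs.length := by positivity
        nlinarith
      obtain ⟨front, d, k, heq, hgf, hd1, hd2⟩ := ih hgx hx
      refine ⟨front, d, k + 1, ?_, hgf, hd1, hd2⟩
      rw [heq, List.replicate_succ' (n := k)]
      simp

lemma increment_spec (codes : List Int) (h : GoodC codes)
    (hlt : valC codes < 26 ^ codes.length - 1) :
    ∃ codes', increment_list_ord codes = some codes' ∧ GoodC codes' ∧
      codes'.length = codes.length ∧ valC codes' = valC codes + 1 := by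
  obtain ⟨front, d, k, rfl, hgf, hd1, hd2⟩ := exists_split codes h hlt
  refine ⟨front ++ (d + 1) :: List.replicate k 97, ?_, ?_, ?_, ?_⟩
  · unfold increment_list_ord
    have hlen : (front ++ d :: List.replicate k 122).length = front.length + k + 1 := by
      simp; omega
    have hidx : (((front ++ d :: List.replicate k 122).length : Nat) : Int) - 1
        = ((front.length + k : Nat) : Int) := by
      rw [hlen]; push_cast; ring
    have h0 : front ++ d :: List.replicate k 122
        = front ++ d :: (List.replicate k 122 ++ List.replicate 0 97) := by simp
    rw [hidx]
    conv_lhs => rw [h0]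
    rw [incr_spec k 0 front d _ hd1 hd2 (by simp only [List.length_append, List.length_cons, List.length_replicate]; omega)]
    simp
  · intro x hx
    simp only [List.mem_append, List.mem_cons, List.mem_replicate] at hx
    rcases hx with hx | hx | hx
    · exact hgf x hx
    · omega
    · omega
  · simp
  · rw [valC_append, valC_append, valC_cons, valC_cons, valC_replicate_a, valC_replicate_z]
    simp only [List.length_cons, List.length_replicate]
    ring

lemma good_ord (s : String) (h : ∀ c ∈ s.toList, 'a' ≤ c ∧ c ≤ 'z') :
    GoodC (get_list_ord s) :=
  good_map s.toList h

lemma valC_ord (s : String) : valC (get_list_ord s) = b_to_num s := by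
  unfold valC get_list_ord b_to_num
  rw [List.foldl_map]

lemma map_ord_chr (codes : List Int) (h : GoodC codes) :
    (codes.map (fun n => Char.ofNat n.toNat)).map (fun c => (c.toNat : Int)) = codes := by
  rw [List.map_map]
  induction codes with
  | nil => rfl
  | cons c cs ih =>
    have hc := h c List.mem_cons_self
    simp only [List.map_cons, Function.comp_apply]
    rw [ih (fun x hx => h x (List.mem_cons_of_mem _ hx))]
    rw [ord_chr c hc.1 hc.2]

lemma map_chr_ord : ∀ (l : List Char),
    l.map ((fun n : Int => Char.ofNat n.toNat) ∘ (fun c : Char => (c.toNat : Int))) = l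
  | [] => rfl
  | c :: cs => by
    simp only [List.map_cons, Function.comp_apply]
    rw [map_chr_ord cs, chr_ord c]

lemma get_str_chr_ord (s : String) : get_str_chr (get_list_ord s) = s := by
  unfold get_str_chr get_list_ord
  rw [List.map_map, map_chr_ord s.toList, String.ofList_toList]

-- get_str_chr codes = s ↔ the values agree (for good codes of the right length)
lemma str_eq_iff_val_eq (codes : List Int) (s : String) (hc : GoodC codes)
    (hs : ∀ c ∈ s.toList, 'a' ≤ c ∧ c ≤ 'z') (hlen : codes.length = s.toList.length) :
    get_str_chr codes = s ↔ valC codes = b_to_num s := by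
  constructor
  · intro heq
    have h1 : codes.map (fun n => Char.ofNat n.toNat) = s.toList := by
      have := congrArg String.toList heq
      simpa [get_str_chr, String.toList_ofList] using this
    have h2 : codes = get_list_ord s := by
      rw [← map_ord_chr codes hc, h1]; rfl
    rw [h2, valC_ord]
  · intro hv
    have h1 : get_str_chr codes = b_to_str codes.length (valC codes) :=
      (b_to_str_val codes hc).symm
    have hlen2 : (get_list_ord s).length = s.toList.length := by simp [get_list_ord]
    have h2 : b_to_str (get_list_ord s).length (valC (get_list_ord s)) = get_str_chr (get_list_ord s) :=
      b_to_str_val (get_list_ord s) (good_ord s hs)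
    rw [h1, hlen, hv, ← valC_ord s, ← hlen2, h2, get_str_chr_ord s]

lemma pyRange_nil_of_le (a b : Int) (h : b ≤ a) : PySem.List.pyRange a b = [] := by
  rw [List.eq_nil_iff_forall_not_mem]
  intro x hx
  rw [PySem.List.mem_pyRange_one] at hx
  omega

lemma loop_spec (s2 : String) (hs2 : ∀ c ∈ s2.toList, 'a' ≤ c ∧ c ≤ 'z') :
    ∀ (f : Nat) (codes : List Int) (acc : List String),
    GoodC codes → codes.length = s2.toList.length →
    valC codes ≤ b_to_num s2 → (b_to_num s2 - valC codes).toNat < f →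
    iter_loop f s2 codes acc
      = acc ++ (PySem.List.pyRange (valC codes + 1) (b_to_num s2 + 1)).map
          (b_to_str s2.toList.length) := by
  intro f
  induction f with
  | zero => intro codes acc _ _ _ hf; omega
  | succ f ih =>
    intro codes acc hg hlen hle hf
    rw [iter_loop]
    by_cases heq : valC codes = b_to_num s2
    · rw [if_pos ((str_eq_iff_val_eq codes s2 hg hs2 hlen).mpr heq)]
      rw [heq, pyRange_nil_of_le _ _ le_rfl]
      simp
    · have hlt : valC codes < b_to_num s2 := lt_of_le_of_ne hle heq
      rw [if_neg (fun hc => heq ((str_eq_iff_val_eq codes s2 hg hs2 hlen).mp hc))]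
      have hub : valC codes < 26 ^ codes.length - 1 := by
        have hb := valC_lt (get_list_ord s2) (good_ord s2 hs2)
        have hlen2 : (get_list_ord s2).length = s2.toList.length := by simp [get_list_ord]
        rw [hlen2, valC_ord] at hb
        rw [hlen]
        omega
      obtain ⟨codes', hinc, hg', hlen', hv'⟩ := increment_spec codes hg hub
      rw [hinc]
      change iter_loop f s2 codes' (acc ++ [get_str_chr codes']) = _
      have hstr : get_str_chr codes' = b_to_str s2.toList.length (valC codes + 1) := by
        have hb := b_to_str_val codes' hg'
        rw [hlen', hlen, hv'] at hb
        exact hb.symm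
      rw [ih codes' (acc ++ [get_str_chr codes']) hg' (by rw [hlen', hlen]) (by omega) (by omega)]
      rw [hv', PySem.List.pyRange_one_cons (by omega : valC codes + 1 < b_to_num s2 + 1)]
      simp [hstr]

-- lexicographic order on equal-length lowercase strings agrees with the base-26 value
lemma val_le_of_not_lt : ∀ (l1 l2 : List Char),
    (∀ c ∈ l1, 'a' ≤ c ∧ c ≤ 'z') → (∀ c ∈ l2, 'a' ≤ c ∧ c ≤ 'z') →
    l1.length = l2.length → ¬ l2 < l1 →
    valC (l1.map (fun c => (c.toNat : Int))) ≤ valC (l2.map (fun c => (c.toNat : Int)))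
  | [], [], _, _, _, _ => le_rfl
  | [], c :: t, _, _, hlen, _ => by simp at hlen
  | c :: t, [], _, _, hlen, _ => by simp at hlen
  | c1 :: t1, c2 :: t2, h1, h2, hlen, h => by
    have hnlt : ¬ c2 < c1 := fun hx => h (List.cons_lt_cons_iff.mpr (Or.inl hx))
    have himp : ¬ (c2 = c1 ∧ t2 < t1) :=
      fun hx => h (List.cons_lt_cons_iff.mpr (Or.inr hx))
    have hle : c1 ≤ c2 := Char.not_lt.mp hnlt
    have hg1 : GoodC (t1.map (fun c => (c.toNat : Int))) :=
      good_map t1 (fun x hx => h1 x (List.mem_cons_of_mem _ hx))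
    have hg2 : GoodC (t2.map (fun c => (c.toNat : Int))) :=
      good_map t2 (fun x hx => h2 x (List.mem_cons_of_mem _ hx))
    have hlent : t1.length = t2.length := by simpa using hlen
    simp only [List.map_cons]
    rw [valC_cons, valC_cons]
    simp only [List.length_map, hlent]
    rcases eq_or_lt_of_le hle with heq | hlt
    · subst heq
      have hnt : ¬ t2 < t1 := fun hcon => himp ⟨rfl, hcon⟩
      have := val_le_of_not_lt t1 t2 (fun x hx => h1 x (List.mem_cons_of_mem _ hx))
        (fun x hx => h2 x (List.mem_cons_of_mem _ hx)) hlent hnt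
      omega
    · have hcn : (c1.toNat : Int) < (c2.toNat : Int) := by
        exact_mod_cast char_lt_toNat hlt
      have hv1 := valC_lt (t1.map (fun c => (c.toNat : Int))) hg1
      have hv2 := valC_nonneg (t2.map (fun c => (c.toNat : Int))) hg2
      simp only [List.length_map, hlent] at hv1
      have hstep : ((c1.toNat : Int) - 97 + 1) * 26 ^ t2.length
          ≤ ((c2.toNat : Int) - 97) * 26 ^ t2.length := by
        apply mul_le_mul_of_nonneg_right (by omega) (by positivity)
      nlinarith [hv1, hv2, hstep]

lemma char_facts (c : Char) (ha : 'a' ≤ c) (hz : c ≤ 'z') :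
    PySem.Chars.isalpha c = true ∧ PySem.Chars.isupper c = false := by
  have hup : PySem.Chars.isupper c = false := by
    have hcz : ¬ c ≤ 'Z' := fun hc => absurd (le_trans ha hc) (by decide)
    simp [PySem.Chars.isupper, hcz]
  have hlow : PySem.Chars.islower c = true := by
    simp [PySem.Chars.islower, ha, hz]
  exact ⟨by simp [PySem.Chars.isalpha, hlow], hup⟩

lemma correct_of_pre (s : String) (hne : s.toList ≠ [])
    (h : ∀ c ∈ s.toList, 'a' ≤ c ∧ c ≤ 'z') :
    (PySem.Str.strIsalpha s && str_islower s) = true := by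
  obtain ⟨c0, hc0⟩ := List.exists_mem_of_ne_nil _ hne
  rw [Bool.and_eq_true]
  constructor
  · have hb : PySem.Str.strIsalpha s = PySem.Chars.strIsalpha s.toList := by
      simp [pysem]
    rw [hb]
    unfold PySem.Chars.strIsalpha
    rw [Bool.and_eq_true, List.all_eq_true]
    refine ⟨by simp [hne], fun c hc => (char_facts c (h c hc).1 (h c hc).2).1⟩
  · unfold str_islower
    rw [Bool.and_eq_true]
    constructor
    · exact List.any_eq_true.mpr ⟨c0, hc0, (char_facts c0 (h c0 hc0).1 (h c0 hc0).2).1⟩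
    · rw [Bool.not_eq_eq_eq_not, Bool.not_true, List.any_eq_false]
      intro c hc
      simp [(char_facts c (h c hc).1 (h c hc).2).2]

-- ===== VERDICT (by name: the statement is the Claim_ definition above) =====
theorem get_iterating_strs_spec : Claim_equal_get_iterating_strs := by
  intro s1 s2 hdom hpre
  obtain ⟨hlen, hnlt, hne, hA1, hA2⟩ := hpre
  have h1 : ∀ c ∈ s1.toList, 'a' ≤ c ∧ c ≤ 'z' := by
    intro c hc
    have := List.all_eq_true.mp hA1 c hc
    simpa [PySem.Chars.islower] using this
  have h2 : ∀ c ∈ s2.toList, 'a' ≤ c ∧ c ≤ 'z' := by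
    intro c hc
    have := List.all_eq_true.mp hA2 c hc
    simpa [PySem.Chars.islower] using this
  have hne2 : s2.toList ≠ [] := by
    intro hnil
    apply hne
    apply List.eq_nil_of_length_eq_zero
    rw [hlen, hnil]
    rfl
  have hc1 := correct_of_pre s1 hne h1
  have hc2 := correct_of_pre s2 hne2 h2
  unfold Spec_get_iterating_strs get_iterating_strs get_iterating_strs_alt
  have hlens : PySem.Str.len s1 = PySem.Str.len s2 := by
    simp [PySem.Str.len_eq, hlen]
  have hic1 : is_correct_str s1 = true := by unfold is_correct_str; exact hc1
  have hic2 : is_correct_str s2 = true := by unfold is_correct_str; exact hc2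
  have hguard : ¬ (PySem.Str.len s1 ≠ PySem.Str.len s2 ∨ s2 < s1
      ∨ ¬ is_correct_str s1 ∨ ¬ is_correct_str s2) := by
    intro hor
    rcases hor with hx | hx | hx | hx
    · exact hx hlens
    · exact hnlt (String.lt_iff_toList_lt.mp hx)
    · exact hx hic1
    · exact hx hic2
  have hguard' : ¬ (PySem.Str.len s1 ≠ PySem.Str.len s2 ∨ s2 < s1
      ∨ ¬ (PySem.Str.strIsalpha s1 && str_islower s1)
      ∨ ¬ (PySem.Str.strIsalpha s2 && str_islower s2)) := by
    intro hor
    rcases hor with hx | hx | hx | hx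
    · exact hx hlens
    · exact hnlt (String.lt_iff_toList_lt.mp hx)
    · exact hx hc1
    · exact hx hc2
  rw [if_neg hguard, if_neg hguard']
  have hg1 : GoodC (get_list_ord s1) := good_ord s1 h1
  have hlen1 : (get_list_ord s1).length = s2.toList.length := by simp [get_list_ord, hlen]
  have hle : b_to_num s1 ≤ b_to_num s2 := by
    have hlt := val_le_of_not_lt s1.toList s2.toList h1 h2 hlen
      hnlt
    rw [← valC_ord s1, ← valC_ord s2]
    exact hlt
  have hb2 : b_to_num s2 < 26 ^ s2.toList.length := by
    have hb := valC_lt (get_list_ord s2) (good_ord s2 h2)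
    have hlen2 : (get_list_ord s2).length = s2.toList.length := by simp [get_list_ord]
    rw [hlen2, valC_ord] at hb
    exact hb
  have h0 : 0 ≤ valC (get_list_ord s1) := valC_nonneg _ hg1
  have h0' : 0 ≤ b_to_num s1 := by rw [← valC_ord s1]; exact h0
  rw [loop_spec s2 h2 _ (get_list_ord s1) [s1] hg1 hlen1
    (by rw [valC_ord]; exact hle)
    (by
      rw [valC_ord]
      have h26 : (26 : Int) ^ s2.toList.length = ((26 ^ s2.toList.length : Nat) : Int) := by
        push_cast; ring
      rw [h26] at hb2
      omega)]
  rw [valC_ord]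
  have hs1 : b_to_str s2.toList.length (b_to_num s1) = s1 := by
    have hb := b_to_str_val (get_list_ord s1) hg1
    rw [valC_ord] at hb
    have hlen3 : (get_list_ord s1).length = s2.toList.length := by simp [get_list_ord, hlen]
    rw [hlen3] at hb
    rw [hb, get_str_chr_ord s1]
  rw [show s1.toList.length = s2.toList.length from hlen]
  rw [PySem.List.pyRange_one_cons (by omega : b_to_num s1 < b_to_num s2 + 1)]
  rw [List.map_cons, hs1]
  rfl
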